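-- pv_equiv track=rewrite | github.com/PutongK/AMPL_texture_toolkit | texture_dual.py | reorder_control_points_dual
-- ===== SOURCE A (Python) =====
-- def reorder_control_points_dual(pairs, mode="one_direction", direction="inward"):
--     num_pairs = len(pairs)
--
--     # Determine pair sequence
--     if direction == "inward":
--         # From ends to center (original logic)
--         ordered_indices = []
--         for i in range((num_pairs + 1) // 2):
--             ordered_indices.append(i)
--             if i != num_pairs - 1 - i:
--                 ordered_indices.append(num_pairs - 1 - i)
--     elif direction == "outward":
--         # From center to ends
--         mid = num_pairs // 2
--         ordered_indices = [mid]
--         for i in range(1, mid + 1):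
--             if mid - i >= 0:
--                 ordered_indices.append(mid - i)
--             if mid + i < num_pairs:
--                 ordered_indices.append(mid + i)
--     else:
--         raise ValueError("Direction must be 'inward' or 'outward'")
--
--     # Reorder control points
--     ordered_points = []
--     for idx, i in enumerate(ordered_indices):
--         pt1, pt2 = pairs[i]
--         if pt1[0] > pt2[0]:
--             pt1, pt2 = pt2, pt1
--         if mode == "zig_zag" and idx % 2 == 1:
--             ordered_points.extend([pt2, pt1])
--         else:
--             ordered_points.extend([pt1, pt2])
--
--     return ordered_points
-- ===== SOURCE B (Python) =====
-- def _emit(pairs, idx, i, mode):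
--     pt1, pt2 = pairs[i]
--     if pt1[0] > pt2[0]:
--         pt1, pt2 = pt2, pt1
--     if mode == "zig_zag" and idx % 2 == 1:
--         return [pt2, pt1]
--     return [pt1, pt2]
--
--
-- def reorder_control_points_dual(pairs, mode="one_direction", direction="inward"):
--     n = len(pairs)
--     # Unique scalar sort keys replace the two hand-written interleaving loops.
--     if direction == "inward":
--         order = sorted(range(n), key=lambda i: 2 * min(i, n - 1 - i) + (1 if i > n - 1 - i else 0))
--     elif direction == "outward":
--         m = n // 2
--         order = sorted(range(n), key=lambda i: 2 * abs(i - m) + (1 if i > m else 0))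
--     else:
--         raise ValueError("Direction must be 'inward' or 'outward'")
--     return [pt for idx, i in enumerate(order) for pt in _emit(pairs, idx, i, mode)]
-- ===== Notes on version B (the rewrite author's own statement) =====
-- stated objective: alternative
-- what changed: The two hand-written inward/outward interleaving loops over indices are replaced by a single key-based sort of range(n) with unique scalar keys, and the output loop becomes a flat list comprehension.
import Mathlib
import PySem

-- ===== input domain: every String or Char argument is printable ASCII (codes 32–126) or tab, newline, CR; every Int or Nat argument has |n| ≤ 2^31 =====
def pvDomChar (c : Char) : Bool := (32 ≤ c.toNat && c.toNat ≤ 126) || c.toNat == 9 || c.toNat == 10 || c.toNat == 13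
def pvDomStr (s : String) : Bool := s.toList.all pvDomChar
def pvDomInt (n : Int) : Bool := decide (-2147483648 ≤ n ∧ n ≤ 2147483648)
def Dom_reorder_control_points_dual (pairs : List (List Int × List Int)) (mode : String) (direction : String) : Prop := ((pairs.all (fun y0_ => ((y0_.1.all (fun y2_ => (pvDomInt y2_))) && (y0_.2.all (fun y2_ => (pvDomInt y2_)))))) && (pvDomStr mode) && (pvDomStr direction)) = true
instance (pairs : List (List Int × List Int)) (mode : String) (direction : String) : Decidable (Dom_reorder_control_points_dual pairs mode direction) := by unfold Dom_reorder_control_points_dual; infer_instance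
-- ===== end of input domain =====

-- B replaces A's two hand-written interleaving loops by a key-based sort of the pair
-- indices (unique scalar keys); objective: alternative. Equality of return values is
-- proved on Pre_ (A raises outside it).

-- ===== PORT A =====
def reorder_control_points_dual (pairs : List (List Int × List Int)) (mode : String) (direction : String) : List (List Int) :=
  let num_pairs : Int := pairs.length
  let ordered_indices : List Int :=
    if direction == "inward" then
      (PySem.List.pyRange 0 (PySem.Int.floordiv (num_pairs + 1) 2)).foldl
        (fun acc i =>
          let acc := acc ++ [i]
          if i ≠ num_pairs - 1 - i then acc ++ [num_pairs - 1 - i] else acc) []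
    else if direction == "outward" then
      let mid := PySem.Int.floordiv num_pairs 2
      (PySem.List.pyRange 1 (mid + 1)).foldl
        (fun acc i =>
          let acc := if mid - i ≥ 0 then acc ++ [mid - i] else acc
          if mid + i < num_pairs then acc ++ [mid + i] else acc) [mid]
    else []  -- ValueError in Python: excluded by Pre_
  (PySem.List.enumerate ordered_indices).foldl
    (fun acc p =>
      let pt := (PySem.List.pyGet? pairs p.2).getD ([], [])  -- in range under Pre_
      let pt := if (PySem.List.pyGet? pt.1 0).getD 0 > (PySem.List.pyGet? pt.2 0).getD 0 then (pt.2, pt.1) else pt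
      if mode == "zig_zag" && PySem.Int.mod p.1 2 == 1 then acc ++ [pt.2, pt.1]
      else acc ++ [pt.1, pt.2]) []

-- ===== PORT B =====
def pvEmit (pairs : List (List Int × List Int)) (idx : Int) (i : Int) (mode : String) : List (List Int) :=
  let pt := (PySem.List.pyGet? pairs i).getD ([], [])  -- in range under Pre_
  let pt := if (PySem.List.pyGet? pt.1 0).getD 0 > (PySem.List.pyGet? pt.2 0).getD 0 then (pt.2, pt.1) else pt
  if mode == "zig_zag" && PySem.Int.mod idx 2 == 1 then [pt.2, pt.1] else [pt.1, pt.2]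

def reorder_control_points_dual_alt (pairs : List (List Int × List Int)) (mode : String) (direction : String) : List (List Int) :=
  let n : Int := pairs.length
  if direction == "inward" then
    let order := PySem.List.sorted (PySem.List.pyRange 0 n)
      (fun i => 2 * min i (n - 1 - i) + (if i > n - 1 - i then 1 else 0))
    (PySem.List.enumerate order).flatMap (fun p => pvEmit pairs p.1 p.2 mode)
  else if direction == "outward" then
    let m := PySem.Int.floordiv n 2
    let order := PySem.List.sorted (PySem.List.pyRange 0 n)
      (fun i => 2 * |i - m| + (if i > m then 1 else 0))
    (PySem.List.enumerate order).flatMap (fun p => pvEmit pairs p.1 p.2 mode)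
  else []  -- ValueError in Python: excluded by Pre_

-- ===== PRECONDITION & SPEC =====
-- Pre_ excludes exactly the inputs where Python A raises: an invalid direction (ValueError),
-- direction "outward" with an empty list (IndexError pairs[0]), and any empty point (pt[0]).
def Pre_reorder_control_points_dual (pairs : List (List Int × List Int)) (mode : String) (direction : String) : Prop :=
  (direction = "inward" ∨ (direction = "outward" ∧ pairs ≠ [])) ∧
  ∀ p ∈ pairs, p.1 ≠ [] ∧ p.2 ≠ []
instance (pairs : List (List Int × List Int)) (mode : String) (direction : String) : Decidable (Pre_reorder_control_points_dual pairs mode direction) := by unfold Pre_reorder_control_points_dual; infer_instance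
def pvWitness_reorder_control_points_dual : (List (List Int × List Int)) × String × String :=
  ([([3], [0]), ([1], [2]), ([4], [5])], "zig_zag", "inward")

def Spec_reorder_control_points_dual (pairs : List (List Int × List Int)) (mode : String) (direction : String) (out : List (List Int)) : Prop := out = reorder_control_points_dual_alt pairs mode direction
instance (pairs : List (List Int × List Int)) (mode : String) (direction : String) (out : List (List Int)) : Decidable (Spec_reorder_control_points_dual pairs mode direction out) := by unfold Spec_reorder_control_points_dual; infer_instance

-- ===== CLAIM (what is proved, stated in full; the proofs are below) =====
def Claim_equal_reorder_control_points_dual : Prop := ∀ (pairs : List (List Int × List Int)) (mode : String) (direction : String), Dom_reorder_control_points_dual pairs mode direction → Pre_reorder_control_points_dual pairs mode direction → Spec_reorder_control_points_dual pairs mode direction (reorder_control_points_dual pairs mode direction)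
-- ===== LEMMAS AND PROOFS =====

-- "any strictly key-increasing list with exactly the members 0..n-1 is sorted(range(n), key)"
theorem pv_sorted_range_eq {n : Int} {ys : List Int} {key : Int → Int}
    (hp : List.Pairwise (fun a b => key a < key b) ys)
    (hm : ∀ x, x ∈ ys ↔ 0 ≤ x ∧ x < n) :
    PySem.List.sorted (PySem.List.pyRange 0 n) key = ys := by
  apply PySem.List.sorted_eq_of_perm_of_pairwise_lt _ _ _ ?_ hp
  have h1 : ys.Nodup := hp.imp (fun h => by rintro rfl; exact lt_irrefl _ h)
  rw [List.perm_ext_iff_of_nodup h1 (PySem.List.nodup_pyRange_one 0 n)]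
  intro a
  rw [hm, PySem.List.mem_pyRange_one]

-- A's inward index loop, rewritten as a flatMap
theorem pv_foldl_gIn (n : Int) (l : List Int) (acc : List Int) :
    l.foldl (fun acc i =>
        let acc := acc ++ [i]
        if i ≠ n - 1 - i then acc ++ [n - 1 - i] else acc) acc
      = acc ++ l.flatMap (fun i => if i ≠ n - 1 - i then [i, n - 1 - i] else [i]) := by
  induction l generalizing acc with
  | nil => simp
  | cons h t ih =>
    simp only [List.foldl_cons, List.flatMap_cons, ih]
    split_ifs <;> simp

-- A's outward index loop, rewritten as a flatMap
theorem pv_foldl_gOut (n m : Int) (l : List Int) (acc : List Int) :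
    l.foldl (fun acc i =>
        let acc := if m - i ≥ 0 then acc ++ [m - i] else acc
        if m + i < n then acc ++ [m + i] else acc) acc
      = acc ++ l.flatMap (fun i =>
          (if m - i ≥ 0 then [m - i] else []) ++ (if m + i < n then [m + i] else [])) := by
  induction l generalizing acc with
  | nil => simp
  | cons h t ih =>
    simp only [List.foldl_cons, List.flatMap_cons, ih]
    split_ifs <;> simp

-- A's output loop, rewritten as a flatMap of pvEmit
theorem pv_foldl_emit (pairs : List (List Int × List Int)) (mode : String)
    (l : List (Int × Int)) (acc : List (List Int)) :
    l.foldl (fun acc p =>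
        let pt := (PySem.List.pyGet? pairs p.2).getD ([], [])
        let pt := if (PySem.List.pyGet? pt.1 0).getD 0 > (PySem.List.pyGet? pt.2 0).getD 0 then (pt.2, pt.1) else pt
        if mode == "zig_zag" && PySem.Int.mod p.1 2 == 1 then acc ++ [pt.2, pt.1]
        else acc ++ [pt.1, pt.2]) acc
      = acc ++ l.flatMap (fun p => pvEmit pairs p.1 p.2 mode) := by
  induction l generalizing acc with
  | nil => simp
  | cons h t ih =>
    simp only [List.foldl_cons, List.flatMap_cons, ih]
    simp only [pvEmit]
    split_ifs <;> simp

-- sorting range n by B's inward key yields A's inward interleaving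
theorem pv_inward_indices (n : Int) (hn : 0 ≤ n) :
    PySem.List.sorted (PySem.List.pyRange 0 n)
      (fun i => 2 * min i (n - 1 - i) + (if i > n - 1 - i then 1 else 0)) =
    (PySem.List.pyRange 0 (PySem.Int.floordiv (n + 1) 2)).flatMap
      (fun i => if i ≠ n - 1 - i then [i, n - 1 - i] else [i]) := by
  have hdm := PySem.Int.floordiv_mul_add_mod (n + 1) 2
  have h0 := PySem.Int.mod_nonneg (n + 1) (b := 2) (by norm_num)
  have h2 := PySem.Int.mod_lt (n + 1) (b := 2) (by norm_num)
  set c := PySem.Int.floordiv (n + 1) 2 with hc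
  set r := PySem.Int.mod (n + 1) 2 with hr
  apply pv_sorted_range_eq
  · rw [List.flatMap_def, List.pairwise_flatten]
    constructor
    · intro l' hl'
      simp only [List.mem_map] at hl'
      obtain ⟨i, hi, rfl⟩ := hl'
      rw [PySem.List.mem_pyRange_one] at hi
      split_ifs with h
      · refine List.pairwise_cons.2 ⟨?_, List.pairwise_singleton _ _⟩
        intro y hy
        simp at hy
        subst hy
        split_ifs <;> omega
      · exact List.pairwise_singleton _ _
    · rw [List.pairwise_map]
      refine (List.Pairwise.and_mem.mp (PySem.List.pairwise_lt_pyRange_one 0 c)).imp ?_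
      rintro i j ⟨hi, hj, hij⟩
      rw [PySem.List.mem_pyRange_one] at hi hj
      intro x hx y hy
      have hx' : x = i ∨ (i ≠ n - 1 - i ∧ x = n - 1 - i) := by
        split_ifs at hx with h <;> simp at hx <;> tauto
      have hy' : y = j ∨ (j ≠ n - 1 - j ∧ y = n - 1 - j) := by
        split_ifs at hy with h <;> simp at hy <;> tauto
      rcases hx' with rfl | ⟨h1, rfl⟩ <;> rcases hy' with rfl | ⟨h2', rfl⟩ <;>
        split_ifs <;> omega
  · intro x
    simp only [List.mem_flatMap, PySem.List.mem_pyRange_one]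
    constructor
    · rintro ⟨i, ⟨hi0, hic⟩, hx⟩
      split_ifs at hx with h <;> simp at hx <;> omega
    · rintro ⟨hx0, hxn⟩
      refine ⟨min x (n - 1 - x), ⟨by omega, by omega⟩, ?_⟩
      split_ifs with h <;> simp <;> omega

-- sorting range n by B's outward key yields A's outward interleaving
theorem pv_outward_indices (n : Int) (hn : 1 ≤ n) :
    PySem.List.sorted (PySem.List.pyRange 0 n)
      (fun i => 2 * |i - PySem.Int.floordiv n 2| + (if i > PySem.Int.floordiv n 2 then 1 else 0)) =
    PySem.Int.floordiv n 2 ::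
      (PySem.List.pyRange 1 (PySem.Int.floordiv n 2 + 1)).flatMap
        (fun i => (if PySem.Int.floordiv n 2 - i ≥ 0 then [PySem.Int.floordiv n 2 - i] else []) ++
                  (if PySem.Int.floordiv n 2 + i < n then [PySem.Int.floordiv n 2 + i] else [])) := by
  have hdm := PySem.Int.floordiv_mul_add_mod n 2
  have h0 := PySem.Int.mod_nonneg n (b := 2) (by norm_num)
  have h2 := PySem.Int.mod_lt n (b := 2) (by norm_num)
  set m := PySem.Int.floordiv n 2 with hm
  set r := PySem.Int.mod n 2 with hr
  have eA : ∀ i : Int, 1 ≤ i → |m - i - m| = i := fun i hi => by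
    rw [show m - i - m = -i by ring, abs_neg]; exact abs_of_nonneg (by omega)
  have eB : ∀ i : Int, 1 ≤ i → |m + i - m| = i := fun i hi => by
    rw [show m + i - m = i by ring]; exact abs_of_nonneg (by omega)
  apply pv_sorted_range_eq
  · refine List.pairwise_cons.2 ⟨?_, ?_⟩
    · intro y hy
      simp only [List.mem_flatMap, PySem.List.mem_pyRange_one] at hy
      obtain ⟨i, ⟨hi1, hi2⟩, hy⟩ := hy
      have hy' : (m - i ≥ 0 ∧ y = m - i) ∨ (m + i < n ∧ y = m + i) := by
        simp only [List.mem_append] at hy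
        rcases hy with h | h <;> split_ifs at h <;> simp at h <;> tauto
      simp only [sub_self, abs_zero]
      rcases hy' with ⟨h1, rfl⟩ | ⟨h1, rfl⟩
      · rw [eA i hi1]; split_ifs <;> omega
      · rw [eB i hi1]; split_ifs <;> omega
    · rw [List.flatMap_def, List.pairwise_flatten]
      constructor
      · intro l' hl'
        simp only [List.mem_map] at hl'
        obtain ⟨i, hi, rfl⟩ := hl'
        rw [PySem.List.mem_pyRange_one] at hi
        split_ifs with hA hB hB'
        · refine List.pairwise_cons.2 ⟨?_, List.pairwise_singleton _ _⟩
          intro y hy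
          simp at hy
          subst hy
          rw [eA i hi.1, eB i hi.1]; split_ifs <;> omega
        · exact List.pairwise_singleton _ _
        · exact List.pairwise_singleton _ _
        · exact List.Pairwise.nil
      · rw [List.pairwise_map]
        refine (List.Pairwise.and_mem.mp (PySem.List.pairwise_lt_pyRange_one 1 (m + 1))).imp ?_
        rintro i j ⟨hi, hj, hij⟩
        rw [PySem.List.mem_pyRange_one] at hi hj
        intro x hx y hy
        have hx' : (m - i ≥ 0 ∧ x = m - i) ∨ (m + i < n ∧ x = m + i) := by
          simp only [List.mem_append] at hx
          rcases hx with h | h <;> split_ifs at h <;> simp at h <;> tauto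
        have hy' : (m - j ≥ 0 ∧ y = m - j) ∨ (m + j < n ∧ y = m + j) := by
          simp only [List.mem_append] at hy
          rcases hy with h | h <;> split_ifs at h <;> simp at h <;> tauto
        rcases hx' with ⟨h1, rfl⟩ | ⟨h1, rfl⟩ <;> rcases hy' with ⟨h3, rfl⟩ | ⟨h3, rfl⟩ <;>
          simp only [eA i hi.1, eB i hi.1, eA j hj.1, eB j hj.1] <;> split_ifs <;> omega
  · intro x
    simp only [List.mem_cons, List.mem_flatMap, PySem.List.mem_pyRange_one]
    constructor
    · rintro (rfl | ⟨i, ⟨hi1, hi2⟩, hx⟩)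
      · omega
      · simp only [List.mem_append] at hx
        rcases hx with h | h <;> split_ifs at h <;> simp at h <;> omega
    · rintro ⟨hx0, hxn⟩
      rcases lt_trichotomy x m with h | rfl | h
      · refine Or.inr ⟨m - x, ⟨by omega, by omega⟩, ?_⟩
        simp only [List.mem_append]
        left
        split_ifs with hA <;> simp <;> omega
      · exact Or.inl rfl
      · refine Or.inr ⟨x - m, ⟨by omega, by omega⟩, ?_⟩
        simp only [List.mem_append]
        right
        split_ifs with hA <;> simp <;> omega

-- ===== VERDICT (by name: the statement is the Claim_ definition above) =====
theorem reorder_control_points_dual_spec : Claim_equal_reorder_control_points_dual := by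
  intro pairs mode direction _ hpre
  obtain ⟨hd, _⟩ := hpre
  rcases hd with rfl | ⟨rfl, hne⟩
  · simp only [Spec_reorder_control_points_dual, reorder_control_points_dual,
      reorder_control_points_dual_alt, show ("inward" == "inward") = true from by decide, if_true]
    rw [pv_foldl_gIn, pv_foldl_emit, List.nil_append, List.nil_append,
      pv_inward_indices (pairs.length : Int) (by positivity)]
  · simp only [Spec_reorder_control_points_dual, reorder_control_points_dual,
      reorder_control_points_dual_alt, show ("outward" == "inward") = false from by decide,
      show ("outward" == "outward") = true from by decide, Bool.false_eq_true, if_false, if_true]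
    rw [pv_foldl_gOut, pv_foldl_emit,
      pv_outward_indices (pairs.length : Int) (by
        rcases pairs with _ | _
        · exact absurd rfl hne
        · simp)]
    simp
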